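-- pv_equiv track=rewrite | github.com/nobody43/zabbix-mini-IPMI | sender_wrapper.py | sanitizeStr
-- ===== SOURCE A (Python) =====
-- def sanitizeStr(s):
--     """Sanitizes provided string in sequential order.
--     These strings cannot be used in zabbix macro and item names
--     """
--     stopChars = (
--         ('/dev/', ''), (' -d', ''), ('   ', '_'), ('  ', '_'), (' ', '_'),
--         ('!', '_'), (',', '_'), ('[', '_'), ('~', '_'),
--         (']', '_'), ('+', '_'), ('/', '_'), ('\\', '_'), ('\'', '_'),
--         ('`', '_'), ('@', '_'), ('#', '_'), ('$', '_'), ('%', '_'),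
--         ('^', '_'), ('&', '_'), ('*', '_'), ('(', '_'), (')', '_'),
--         ('{', '_'), ('}', '_'), ('=', '_'), (':', '_'), (';', '_'),
--         ('"', '_'), ('?', '_'), ('<', '_'), ('>', '_'),
--     )
--
--     s = s.strip()
--
--     for i, j in stopChars:
--         s = s.replace(i, j)
--
--     return s
-- ===== SOURCE B (Python) =====
-- _BAD = set("!,[~]+/\\'`@#$%^&*(){}=:;\"?<>")
--
-- def sanitizeStr(s):
--     """Sanitizes provided string: after the two order-dependent removals, one
--     character-by-character pass collapses each run of k spaces to ceil(k/3)
--     underscores and maps every disallowed character to '_'."""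
--     s = s.strip().replace('/dev/', '').replace(' -d', '')
--     out = []
--     run = 0
--     for c in s:
--         if c == ' ':
--             run += 1
--         else:
--             if run:
--                 out.append('_' * ((run + 2) // 3))
--                 run = 0
--             out.append('_' if c in _BAD else c)
--     if run:
--         out.append('_' * ((run + 2) // 3))
--     return ''.join(out)
-- ===== Notes on version B (the rewrite author's own statement) =====
-- stated objective: alternative
-- what changed: After the two order-dependent removals, B replaces A's 31 sequential replace passes (three staged space collapses plus 28 per-character scans) by one character-by-character scan that carries a space-run counter, emitting ceil(run/3) underscores per run and mapping each disallowed character inline.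
import Mathlib
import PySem

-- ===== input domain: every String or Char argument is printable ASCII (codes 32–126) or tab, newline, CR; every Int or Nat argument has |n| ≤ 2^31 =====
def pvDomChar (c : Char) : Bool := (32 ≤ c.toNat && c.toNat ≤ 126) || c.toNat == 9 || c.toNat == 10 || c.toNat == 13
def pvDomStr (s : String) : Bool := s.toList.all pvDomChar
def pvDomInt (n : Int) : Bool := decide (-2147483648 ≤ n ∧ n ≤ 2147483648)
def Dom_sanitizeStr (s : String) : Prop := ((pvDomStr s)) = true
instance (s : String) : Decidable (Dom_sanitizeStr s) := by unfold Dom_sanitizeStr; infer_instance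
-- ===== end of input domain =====

-- B replaces A's 31 sequential replace passes (3 space collapses + 28 per-character scans)
-- by ONE character-by-character pass with a space-run counter (each run of k spaces emits
-- ceil(k/3) underscores), after the two order-dependent removals (objective: alternative).

-- ===== PORT A =====
def pvStopChars : List (String × String) :=
  [("/dev/", ""), (" -d", ""), ("   ", "_"), ("  ", "_"), (" ", "_"),
   ("!", "_"), (",", "_"), ("[", "_"), ("~", "_"),
   ("]", "_"), ("+", "_"), ("/", "_"), ("\\", "_"), ("'", "_"),
   ("`", "_"), ("@", "_"), ("#", "_"), ("$", "_"), ("%", "_"),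
   ("^", "_"), ("&", "_"), ("*", "_"), ("(", "_"), (")", "_"),
   ("{", "_"), ("}", "_"), ("=", "_"), (":", "_"), (";", "_"),
   ("\"", "_"), ("?", "_"), ("<", "_"), (">", "_")]

def sanitizeStr (s : String) : String :=
  pvStopChars.foldl (fun acc p => PySem.Str.replace acc p.1 p.2) (PySem.Str.strip s)

-- ===== PORT B =====
def pvBadChars : List Char :=
  ['!', ',', '[', '~', ']', '+', '/', '\\', '\'', '`', '@', '#', '$', '%',
   '^', '&', '*', '(', ')', '{', '}', '=', ':', ';', '"', '?', '<', '>']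

-- out.append('_' * ((run + 2) // 3)) guarded by `if run:`
def pvFlush (run : Nat) : List Char :=
  if run = 0 then [] else List.replicate ((run + 2) / 3) '_'

-- the single for-loop of B: scan char by char carrying the space-run counter
def pvAltGo : List Char → Nat → List Char
  | [], run => pvFlush run
  | c :: t, run =>
    if c = ' ' then pvAltGo t (run + 1)
    else pvFlush run ++ (if c ∈ pvBadChars then '_' else c) :: pvAltGo t 0

def sanitizeStr_alt (s : String) : String :=
  let s1 := PySem.Str.replace (PySem.Str.replace (PySem.Str.strip s) "/dev/" "") " -d" ""
  String.ofList (pvAltGo s1.toList 0)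

-- ===== PRECONDITION & SPEC =====
def Spec_sanitizeStr (s : String) (out : String) : Prop := out = sanitizeStr_alt s
instance (s : String) (out : String) : Decidable (Spec_sanitizeStr s out) := by unfold Spec_sanitizeStr; infer_instance

-- ===== CLAIM (what is proved, stated in full; the proofs are below) =====
def Claim_equal_sanitizeStr : Prop := ∀ (s : String), Dom_sanitizeStr s → Spec_sanitizeStr s (sanitizeStr s)

-- ===== LEMMAS AND PROOFS =====

-- basic equations of PySem.Chars.replace.go
lemma pv_go_zero (old new l acc : List Char) :
    PySem.Chars.replace.go old new 0 l acc = acc.reverse ++ l := by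
  rw [PySem.Chars.replace.go]

lemma pv_go_nil (old new : List Char) (f : Nat) (acc : List Char) :
    PySem.Chars.replace.go old new f [] acc = acc.reverse := by
  cases f <;> rw [PySem.Chars.replace.go] <;> simp

lemma pv_go_cons (old new : List Char) (f : Nat) (c : Char) (t acc : List Char) :
    PySem.Chars.replace.go old new (f + 1) (c :: t) acc =
      if old.isPrefixOf (c :: t) then
        PySem.Chars.replace.go old new f (List.drop old.length (c :: t)) (new.reverse ++ acc)
      else PySem.Chars.replace.go old new f t (c :: acc) := by
  rw [PySem.Chars.replace.go]

lemma pv_go_acc (old new : List Char) :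
    ∀ (f : Nat) (l acc : List Char),
      PySem.Chars.replace.go old new f l acc
        = acc.reverse ++ PySem.Chars.replace.go old new f l [] := by
  intro f
  induction f with
  | zero => intro l acc; simp [pv_go_zero]
  | succ n ih =>
    intro l acc
    cases l with
    | nil => simp [pv_go_nil]
    | cons c t =>
      rw [pv_go_cons, pv_go_cons]
      split_ifs with h
      · rw [ih _ (new.reverse ++ acc), ih _ (new.reverse ++ [])]; simp
      · rw [ih _ (c :: acc), ih _ [c]]; simp

lemma pv_go_fuel (old new : List Char) (h : old ≠ []) :
    ∀ (f₁ f₂ : Nat) (l acc : List Char), l.length ≤ f₁ → l.length ≤ f₂ →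
      PySem.Chars.replace.go old new f₁ l acc = PySem.Chars.replace.go old new f₂ l acc := by
  intro f₁
  induction f₁ with
  | zero =>
    intro f₂ l acc h₁ _
    have : l = [] := List.length_eq_zero_iff.mp (Nat.le_zero.mp h₁)
    subst this; simp [pv_go_nil]
  | succ n ih =>
    intro f₂ l acc h₁ h₂
    cases l with
    | nil => simp [pv_go_nil]
    | cons c t =>
      cases f₂ with
      | zero => simp at h₂
      | succ m =>
        rw [pv_go_cons, pv_go_cons]
        split_ifs with hp
        · have hol : 1 ≤ old.length := by
            cases old with | nil => exact absurd rfl h | cons _ _ => simp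
          apply ih
          · simp only [List.length_drop, List.length_cons]; simp at h₁; omega
          · simp only [List.length_drop, List.length_cons]; simp at h₂; omega
        · apply ih
          · simp at h₁ ⊢; omega
          · simp at h₂ ⊢; omega

lemma pv_replace_eq_go (l old new : List Char) (h : old ≠ []) :
    PySem.Chars.replace l old new = PySem.Chars.replace.go old new l.length l [] := by
  rw [PySem.Chars.replace, if_neg (by simpa [List.isEmpty_iff] using h)]

-- a replicate-space pattern is not a prefix of a string starting with fewer spaces
lemma pv_not_prefix_spaces :
    ∀ (k p : Nat) (cs : List Char), k < p → (∀ c, cs.head? = some c → c ≠ ' ') →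
      (List.replicate p ' ').isPrefixOf (List.replicate k ' ' ++ cs) = false := by
  intro k
  induction k with
  | zero =>
    intro p cs hk hcs
    cases p with
    | zero => omega
    | succ q =>
      cases cs with
      | nil => simp [List.isPrefixOf]
      | cons c t =>
        have : c ≠ ' ' := hcs c (by simp)
        simp [List.replicate_succ, List.isPrefixOf]
        intro h; exact absurd h.symm this
  | succ n ih =>
    intro p cs hk hcs
    cases p with
    | zero => omega
    | succ q =>
      simp only [List.replicate_succ, List.cons_append, List.isPrefixOf]
      simpa using ih q cs (by omega) hcs

-- the main run lemma: go on (spaces^k ++ cs) with all-space pattern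
lemma pv_go_run (p : Nat) (hp : 0 < p) :
    ∀ (k : Nat) (cs acc : List Char) (f : Nat), k + cs.length ≤ f →
      (∀ c, cs.head? = some c → c ≠ ' ') →
      PySem.Chars.replace.go (List.replicate p ' ') ['_'] f (List.replicate k ' ' ++ cs) acc
        = acc.reverse ++ List.replicate (k / p) '_' ++ List.replicate (k % p) ' '
            ++ PySem.Chars.replace cs (List.replicate p ' ') ['_'] := by
  intro k
  induction k using Nat.strong_induction_on with
  | _ k ih =>
    intro cs acc f hf hcs
    have hne : List.replicate p ' ' ≠ ([] : List Char) := by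
      simp [List.replicate_eq_nil_iff]; omega
    by_cases hk0 : k = 0
    · subst hk0
      simp only [List.replicate_zero, List.nil_append, Nat.zero_div, Nat.zero_mod]
      rw [pv_go_acc, pv_go_fuel _ _ hne f cs.length cs [] (by omega) le_rfl,
          ← pv_replace_eq_go cs _ _ hne]
      simp
    · by_cases hkp : p ≤ k
      · -- pattern matches: consume p spaces
        obtain ⟨f', rfl⟩ : ∃ f', f = f' + 1 := ⟨f - 1, by omega⟩
        have hk1 : ∃ k', k = k' + 1 := ⟨k - 1, by omega⟩
        obtain ⟨k', rfl⟩ := hk1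
        rw [List.replicate_succ, List.cons_append, pv_go_cons]
        rw [if_pos]
        · have hdrop : List.drop (List.replicate p ' ').length (' ' :: (List.replicate k' ' ' ++ cs))
              = List.replicate (k' + 1 - p) ' ' ++ cs := by
            rw [List.length_replicate, ← List.cons_append, ← List.replicate_succ,
                List.drop_append_of_le_length (by simp; omega), List.drop_replicate]
          rw [hdrop, ih (k' + 1 - p) (by omega) cs _ f' (by omega) hcs]
          have hdiv : (k' + 1) / p = (k' + 1 - p) / p + 1 := by
            conv_lhs => rw [Nat.div_eq]
            simp [hp, hkp]
          have hmod : (k' + 1) % p = (k' + 1 - p) % p := by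
            conv_lhs => rw [Nat.mod_eq]
            simp [hp, hkp]
          rw [hdiv, hmod, List.replicate_succ]
          simp
        · rw [← List.cons_append, ← List.replicate_succ]
          have : List.replicate p ' ' <+: List.replicate (k' + 1) ' ' := by
            refine ⟨List.replicate (k' + 1 - p) ' ', ?_⟩
            rw [← List.replicate_add]; congr 1; omega
          exact List.isPrefixOf_iff_prefix.mpr (this.trans (List.prefix_append _ _))
      · -- 0 < k < p : leading space passes through
        obtain ⟨f', rfl⟩ : ∃ f', f = f' + 1 := ⟨f - 1, by omega⟩
        obtain ⟨k', rfl⟩ : ∃ k', k = k' + 1 := ⟨k - 1, by omega⟩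
        have hnp := pv_not_prefix_spaces (k' + 1) p cs (by omega) hcs
        rw [List.replicate_succ, List.cons_append, pv_go_cons,
            if_neg (by rw [← List.cons_append, ← List.replicate_succ]; simp [hnp])]
        rw [ih k' (by omega) cs (' ' :: acc) f' (by omega) hcs]
        have h1 : (k' + 1) / p = 0 := Nat.div_eq_of_lt (by omega)
        have h2 : k' / p = 0 := Nat.div_eq_of_lt (by omega)
        have h3 : (k' + 1) % p = k' + 1 := Nat.mod_eq_of_lt (by omega)
        have h4 : k' % p = k' := Nat.mod_eq_of_lt (by omega)
        rw [h1, h2, h3, h4, List.replicate_succ]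
        simp

lemma pv_replace_run (p : Nat) (hp : 0 < p) (k : Nat) (cs : List Char)
    (hcs : ∀ c, cs.head? = some c → c ≠ ' ') :
    PySem.Chars.replace (List.replicate k ' ' ++ cs) (List.replicate p ' ') ['_']
      = List.replicate (k / p) '_' ++ List.replicate (k % p) ' '
          ++ PySem.Chars.replace cs (List.replicate p ' ') ['_'] := by
  have hne : List.replicate p ' ' ≠ ([] : List Char) := by
    simp [List.replicate_eq_nil_iff]; omega
  rw [pv_replace_eq_go _ _ _ hne]
  rw [pv_go_run p hp k cs [] _ (by simp) hcs]
  simp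

-- space-free prefixes pass through an all-space-pattern replace unchanged
lemma pv_replace_nospace_append (p : Nat) (hp : 0 < p) :
    ∀ (xs ys : List Char), (∀ c ∈ xs, c ≠ ' ') →
      PySem.Chars.replace (xs ++ ys) (List.replicate p ' ') ['_']
        = xs ++ PySem.Chars.replace ys (List.replicate p ' ') ['_'] := by
  intro xs
  induction xs with
  | nil => intro ys _; simp
  | cons c t ih =>
    intro ys hxs
    have hne : List.replicate p ' ' ≠ ([] : List Char) := by
      simp [List.replicate_eq_nil_iff]; omega
    rw [pv_replace_eq_go _ _ _ hne]
    have hlen : (c :: t ++ ys).length = (t ++ ys).length + 1 := by simp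
    rw [hlen, List.cons_append, pv_go_cons]
    have hnp := pv_not_prefix_spaces 0 p (c :: (t ++ ys)) hp
      (fun d hd => by simp at hd; exact hd ▸ hxs c (by simp))
    simp only [List.replicate_zero, List.nil_append] at hnp
    rw [if_neg (by simp [hnp])]
    rw [pv_go_acc, ← pv_replace_eq_go _ _ _ hne, ih ys (fun d hd => hxs d (by simp [hd]))]
    simp

-- single-char replace is a map (for the ' '→'_' pass and the 28-char chain)
lemma pv_go_single (a b : Char) (fuel : Nat) : ∀ (l acc : List Char),
    PySem.Chars.replace.go [a] [b] fuel l acc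
      = acc.reverse ++ (l.take fuel).map (fun c => if c = a then b else c) ++ l.drop fuel := by
  induction fuel with
  | zero => intro l acc; simp [pv_go_zero]
  | succ n ih =>
    intro l acc
    cases l with
    | nil => simp [pv_go_nil]
    | cons c t =>
      rw [pv_go_cons]
      by_cases h : c = a
      · subst h
        rw [if_pos (by simp [List.isPrefixOf])]
        rw [ih]; simp
      · rw [if_neg (by simp [List.isPrefixOf, Ne.symm h])]
        rw [ih]; simp [h]

lemma pv_replace_single (cs : List Char) (a b : Char) :
    PySem.Chars.replace cs [a] [b] = cs.map (fun c => if c = a then b else c) := by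
  simp [PySem.Chars.replace, pv_go_single]

-- a chain of single-char replaces by '_' over chars not containing '_' is one map
lemma pv_chain (as : List Char) (h : '_' ∉ as) : ∀ (t : String),
    (as.foldl (fun acc c => PySem.Str.replace acc (String.ofList [c]) "_") t).toList
      = t.toList.map (fun c => if c ∈ as then '_' else c) := by
  induction as with
  | nil => intro t; simp
  | cons a as ih =>
    intro t
    have ha : '_' ≠ a := fun e => h (e ▸ List.mem_cons_self)
    have has : '_' ∉ as := fun e => h (List.mem_cons_of_mem _ e)
    rw [List.foldl_cons, ih has]
    have : (PySem.Str.replace t (String.ofList [a]) "_").toList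
        = t.toList.map (fun c => if c = a then '_' else c) := by
      rw [PySem.Str.toList_replace, String.toList_ofList]
      exact pv_replace_single _ _ _
    rw [this, List.map_map]
    refine List.map_congr_left (fun c _ => ?_)
    by_cases hc : c = a
    · subst hc; simp [Function.comp, has]
    · simp [Function.comp, hc]

-- A's space/char pipeline after the two removals, at the char-list level
def pvApipe (cs : List Char) : List Char :=
  ((PySem.Chars.replace (PySem.Chars.replace cs (List.replicate 3 ' ') ['_'])
      (List.replicate 2 ' ') ['_']).map (fun c => if c = ' ' then '_' else c)).map
    (fun c => if c ∈ pvBadChars then '_' else c)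

lemma pv_flush_count (k : Nat) :
    List.replicate (k / 3) '_' ++ (List.replicate (k % 3 / 2) '_' ++ List.replicate (k % 3 % 2) '_')
      = pvFlush k := by
  unfold pvFlush
  rw [← List.replicate_add, ← List.replicate_add]
  by_cases hk : k = 0
  · subst hk; simp
  · rw [if_neg hk]; congr 1; omega

lemma pv_main : ∀ (cs : List Char) (k : Nat),
    pvApipe (List.replicate k ' ' ++ cs) = pvAltGo cs k := by
  intro cs
  induction cs with
  | nil =>
    intro k
    unfold pvApipe
    rw [List.append_nil, ← List.append_nil (List.replicate k ' '),
        pv_replace_run 3 (by omega) k [] (by simp)]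
    rw [show PySem.Chars.replace ([] : List Char) (List.replicate 3 ' ') ['_'] = [] by
          simp [PySem.Chars.replace, pv_go_zero]]
    rw [List.append_nil, pv_replace_nospace_append 2 (by omega) _ _ (by simp)]
    rw [← List.append_nil (List.replicate (k % 3) ' '),
        pv_replace_run 2 (by omega) (k % 3) [] (by simp)]
    rw [show PySem.Chars.replace ([] : List Char) (List.replicate 2 ' ') ['_'] = [] by
          simp [PySem.Chars.replace, pv_go_zero]]
    simp only [List.append_nil, List.map_append, List.map_replicate, reduceIte, ite_self]
    rw [pv_flush_count]
    rfl
  | cons c t ih =>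
    intro k
    by_cases hc : c = ' '
    · subst hc
      rw [show List.replicate k ' ' ++ ' ' :: t = List.replicate (k + 1) ' ' ++ t by
            rw [List.replicate_succ']; simp]
      rw [ih (k + 1)]
      simp [pvAltGo]
    · unfold pvApipe
      rw [pv_replace_run 3 (by omega) k (c :: t) (fun d hd => by simp at hd; exact hd ▸ hc)]
      rw [show (c :: t) = [c] ++ t from rfl,
          pv_replace_nospace_append 3 (by omega) [c] t (by simpa using hc)]
      rw [show List.replicate (k / 3) '_' ++ List.replicate (k % 3) ' '
            ++ ([c] ++ PySem.Chars.replace t (List.replicate 3 ' ') ['_'])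
          = List.replicate (k / 3) '_' ++ (List.replicate (k % 3) ' '
            ++ ([c] ++ PySem.Chars.replace t (List.replicate 3 ' ') ['_'])) by simp]
      rw [pv_replace_nospace_append 2 (by omega) _ _ (by simp)]
      rw [pv_replace_run 2 (by omega) (k % 3) _ (fun d hd => by simp at hd; exact hd ▸ hc)]
      rw [pv_replace_nospace_append 2 (by omega) [c] _ (by simpa using hc)]
      have ht := ih 0
      unfold pvApipe at ht
      simp only [List.replicate_zero, List.nil_append] at ht
      simp only [List.map_append, List.map_replicate, List.singleton_append, List.map_cons,
        reduceIte, ite_self, List.append_assoc] at ht ⊢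
      rw [if_neg hc, ht]
      rw [show pvAltGo (c :: t) k
            = (if c = ' ' then pvAltGo t (k + 1)
               else pvFlush k ++ (if c ∈ pvBadChars then '_' else c) :: pvAltGo t 0) from rfl,
          if_neg hc, ← pv_flush_count]
      simp only [List.append_assoc]
lemma pv_split : pvStopChars
    = [("/dev/", ""), (" -d", ""), ("   ", "_"), ("  ", "_"), (" ", "_")]
      ++ pvBadChars.map (fun c => (String.ofList [c], "_")) := rfl

-- ===== VERDICT (by name: the statement is the Claim_ definition above) =====
theorem sanitizeStr_spec : Claim_equal_sanitizeStr := by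
  intro s _
  unfold Spec_sanitizeStr sanitizeStr sanitizeStr_alt
  rw [pv_split, List.foldl_append, List.foldl_map]
  simp only [List.foldl_cons, List.foldl_nil]
  apply String.toList_inj.mp
  rw [String.toList_ofList, pv_chain pvBadChars (by decide)]
  rw [PySem.Str.toList_replace, PySem.Str.toList_replace, PySem.Str.toList_replace]
  have := pv_main (PySem.Str.replace (PySem.Str.replace (PySem.Str.strip s) "/dev/" "") " -d" "").toList 0
  unfold pvApipe at this
  simp only [List.replicate_zero, List.nil_append] at this
  rw [show ("   " : String).toList = List.replicate 3 ' ' from rfl,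
      show ("  " : String).toList = List.replicate 2 ' ' from rfl,
      show (" " : String).toList = [' '] from rfl,
      show ("_" : String).toList = ['_'] from rfl, pv_replace_single]
  exact this
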